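-- pv_equiv track=rewrite | github.com/waiwai0310/waiwaihub | complaint_classifier/classifier.py | _mutex_by_priority
-- ===== SOURCE A (Python) =====
-- from typing import Dict, List, Tuple, Optional, Any
--
-- def _mutex_by_priority(
--     parts: List[str],
--     mutex_values: frozenset,
--     priority: Tuple[str, ...],
-- ) -> List[str]:
--     """同一互斥组内只保留 priority 顺序中最先出现的那一个取值。"""
--     present = [p for p in parts if p in mutex_values]
--     if len(present) <= 1:
--         return parts
--     keep: Optional[str] = None
--     for cand in priority:
--         if cand in present:
--             keep = cand
--             break
--     if keep is None:
--         return parts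
--     return [p for p in parts if p not in mutex_values or p == keep]
-- ===== SOURCE B (Python) =====
-- from typing import List, Tuple, Optional
--
--
-- def _mutex_by_priority(
--     parts: List[str],
--     mutex_values: frozenset,
--     priority: Tuple[str, ...],
-- ) -> List[str]:
--     """Keep only the highest-priority mutex value: rank table + min-by-rank selection."""
--     present = [p for p in parts if p in mutex_values]
--     if len(present) <= 1:
--         return parts
--     rank = {}
--     for i, v in enumerate(priority):
--         if v not in rank:
--             rank[v] = i
--     candidates = [p for p in present if p in rank]
--     if not candidates:
--         return parts
--     keep = min(candidates, key=lambda p: rank[p])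
--     return [p for p in parts if p not in mutex_values or p == keep]
-- ===== Notes on version B (the rewrite author's own statement) =====
-- stated objective: alternative
-- what changed: Replaces A's linear scan over priority with an early break by a first-index rank table built once from priority plus a min-by-rank selection over the present mutex values.
import Mathlib
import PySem

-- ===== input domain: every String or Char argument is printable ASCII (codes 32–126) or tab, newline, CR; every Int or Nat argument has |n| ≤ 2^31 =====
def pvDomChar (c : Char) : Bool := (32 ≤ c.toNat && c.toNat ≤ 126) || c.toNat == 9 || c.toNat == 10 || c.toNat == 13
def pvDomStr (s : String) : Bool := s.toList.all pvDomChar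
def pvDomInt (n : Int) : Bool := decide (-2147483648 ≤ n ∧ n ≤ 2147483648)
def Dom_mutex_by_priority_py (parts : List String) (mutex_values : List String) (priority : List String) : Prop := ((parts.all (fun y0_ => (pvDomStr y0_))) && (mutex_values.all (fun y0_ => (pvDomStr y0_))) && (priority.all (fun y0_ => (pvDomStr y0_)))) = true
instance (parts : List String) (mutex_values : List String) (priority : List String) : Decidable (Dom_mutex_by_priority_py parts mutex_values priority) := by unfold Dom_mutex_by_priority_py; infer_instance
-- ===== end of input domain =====

-- B replaces A's break-on-first scan over priority by a first-index rank table plus a min-by-rank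
-- selection over the present mutex values (alternative algorithm, same observable result).


-- ===== PORT A =====
-- literal transliteration of _mutex_by_priority: the 'for cand in priority: … break' loop is List.find?
def mutex_by_priority_py (parts : List String) (mutex_values : List String) (priority : List String) : List String :=
  let present := parts.filter (fun p => mutex_values.contains p)
  if present.length ≤ 1 then parts
  else
    match priority.find? (fun cand => present.contains cand) with
    | none => parts
    | some keep => parts.filter (fun p => !mutex_values.contains p || p == keep)

-- ===== PORT B =====
-- rank-table building step: 'if v not in rank: rank[v] = i'
def pvRankStep (d : PySem.Dict String Int) (iv : Int × String) : PySem.Dict String Int :=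
  if d.contains iv.2 then d else d.insert iv.2 iv.1

-- transliteration of Source B; 'rank[p]' is ported as (rank.get? p).getD 0 — exact here since every
-- candidate is filtered to be a key of rank, so the default is never taken
def mutex_by_priority_py_alt (parts : List String) (mutex_values : List String) (priority : List String) : List String :=
  let present := parts.filter (fun p => mutex_values.contains p)
  if present.length ≤ 1 then parts
  else
    let rank := (PySem.List.enumerate priority 0).foldl pvRankStep PySem.Dict.empty
    let candidates := present.filter (fun p => rank.contains p)
    match PySem.List.min? candidates (fun p => (rank.get? p).getD 0) with
    | none => parts
    | some keep => parts.filter (fun p => !mutex_values.contains p || p == keep)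

-- ===== PRECONDITION & SPEC =====
def Spec_mutex_by_priority_py (parts : List String) (mutex_values : List String) (priority : List String) (out : List String) : Prop := out = mutex_by_priority_py_alt parts mutex_values priority
instance (parts : List String) (mutex_values : List String) (priority : List String) (out : List String) : Decidable (Spec_mutex_by_priority_py parts mutex_values priority out) := by unfold Spec_mutex_by_priority_py; infer_instance

-- ===== CLAIM (what is proved, stated in full; the proofs are below) =====
def Claim_equal_mutex_by_priority_py : Prop := ∀ (parts : List String) (mutex_values : List String) (priority : List String), Dom_mutex_by_priority_py parts mutex_values priority → Spec_mutex_by_priority_py parts mutex_values priority (mutex_by_priority_py parts mutex_values priority)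

-- ===== LEMMAS AND PROOFS =====

-- the rank table's lookup is the first index of x in priority (offset by the start s of enumerate)
lemma rank_get? : ∀ (pr : List String) (s : Int) (d : PySem.Dict String Int) (x : String),
    ((PySem.List.enumerate pr s).foldl pvRankStep d).get? x
      = Option.or (d.get? x) ((List.idxOf? x pr).map (fun j => s + (j : Int)))
  | [], s, d, x => by
      simp [PySem.List.enumerate_nil]
  | h :: t, s, d, x => by
      rw [PySem.List.enumerate_cons, List.foldl_cons, rank_get? t (s + 1), List.idxOf?_cons]
      by_cases hc : d.contains h
      · rw [show pvRankStep d (s, h) = d by simp [pvRankStep, hc]]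
        by_cases hx : h = x
        · subst hx
          have hs : (d.get? h).isSome := by
            rw [← PySem.Dict.contains_eq_isSome_get?]; exact hc
          obtain ⟨v, hv⟩ := Option.isSome_iff_exists.mp hs
          simp [hv]
        · simp only [beq_iff_eq, if_neg hx]
          rcases List.idxOf? x t with _ | a
          · simp
          · have hcast : s + 1 + (a : Int) = s + ((a + 1 : Nat) : Int) := by push_cast; ring
            simp [hcast]
      · rw [show pvRankStep d (s, h) = d.insert h s by simp [pvRankStep, hc]]
        have hdx : d.get? h = none := by
          rw [PySem.Dict.get?_eq_none_iff_contains]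
          simpa using hc
        by_cases hx : h = x
        · subst hx
          simp [PySem.Dict.get?_insert_self, hdx]
        · rw [PySem.Dict.get?_insert_of_ne d s (fun e => hx e.symm)]
          simp only [beq_iff_eq, if_neg hx]
          rcases List.idxOf? x t with _ | a
          · simp
          · have hcast : s + 1 + (a : Int) = s + ((a + 1 : Nat) : Int) := by push_cast; ring
            simp [hcast]

lemma rank_contains (pr : List String) (x : String) :
    ((PySem.List.enumerate pr 0).foldl pvRankStep PySem.Dict.empty).contains x = decide (x ∈ pr) := by
  rw [PySem.Dict.contains_eq_isSome_get?, rank_get?]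
  by_cases hm : x ∈ pr
  · obtain ⟨j, hj⟩ := Option.isSome_iff_exists.mp (List.isSome_idxOf?.mpr hm)
    simp [hj, hm]
  · have hn : List.idxOf? x pr = none :=
      Option.not_isSome_iff_eq_none.mp (fun hs => hm (List.isSome_idxOf?.mp hs))
    simp [hn, hm]

lemma rank_getD (pr : List String) (x : String) (j : Nat) (hj : List.idxOf? x pr = some j) :
    (((PySem.List.enumerate pr 0).foldl pvRankStep PySem.Dict.empty).get? x).getD 0 = (j : Int) := by
  rw [rank_get?, hj]
  simp

-- ===== VERDICT (by name: the statement is the Claim_ definition above) =====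
theorem mutex_by_priority_py_spec : Claim_equal_mutex_by_priority_py := by
  intro parts mv pr _
  unfold Spec_mutex_by_priority_py mutex_by_priority_py mutex_by_priority_py_alt
  set present := parts.filter (fun p => mv.contains p) with hpres
  by_cases hlen : present.length ≤ 1
  · simp [hlen]
  · simp only [if_neg hlen]
    set rank := (PySem.List.enumerate pr 0).foldl pvRankStep PySem.Dict.empty with hrank
    set candidates := present.filter (fun p => rank.contains p) with hcand
    rcases hfind : pr.find? (fun c => present.contains c) with _ | k
    · -- A keeps parts: no priority value is present, so candidates is empty and B keeps parts too
      have hnil : candidates = [] := by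
        rw [hcand, List.filter_eq_nil_iff]
        intro p hp
        rw [rank_contains]
        simp only [decide_eq_true_eq]
        intro hmem
        have := List.find?_eq_none.mp hfind p hmem
        simp at this
        exact this hp
      rw [hnil]
      simp [PySem.List.min?]
    · obtain ⟨hPk, i, hi, hik, hmin⟩ := List.find?_eq_some_iff_getElem.mp hfind
      have hkmem : k ∈ pr := List.mem_of_find?_eq_some hfind
      have hkpres : k ∈ present := by simpa using hPk
      have hkcand : k ∈ candidates := by
        rw [hcand, List.mem_filter]
        exact ⟨hkpres, by rw [rank_contains]; simpa using hkmem⟩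
      rcases hminr : PySem.List.min? candidates (fun p => (rank.get? p).getD 0) with _ | m
      · have : candidates = [] := (PySem.List.min?_eq_none_iff _ _).mp hminr
        rw [this] at hkcand
        exact absurd hkcand List.not_mem_nil
      · have hmcand : m ∈ candidates := PySem.List.min?_mem hminr
        obtain ⟨hmpres, hmrank⟩ := List.mem_filter.mp hmcand
        have hmmem : m ∈ pr := by
          have := hmrank; rw [rank_contains] at this; simpa using this
        -- first indices of m and k in pr
        obtain ⟨jm, hjm⟩ := Option.isSome_iff_exists.mp (List.isSome_idxOf?.mpr hmmem)
        obtain ⟨jk, hjk⟩ := Option.isSome_iff_exists.mp (List.isSome_idxOf?.mpr hkmem)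
        obtain ⟨hjm_lt, hjm_eq, hjm_min⟩ := List.idxOf?_eq_some_iff.mp hjm
        obtain ⟨hjk_lt, hjk_eq, _⟩ := List.idxOf?_eq_some_iff.mp hjk
        -- jk ≤ i: pr[i] = k and jk is the first index of k
        have hjk_le : jk ≤ i := by
          by_contra hlt
          exact (List.idxOf?_eq_some_iff.mp hjk).2.2 i (by omega) hik
        -- i ≤ jm: pr[jm] = m is present, i is the first present index
        have hi_le : i ≤ jm := by
          by_contra hlt
          have := hmin jm (by omega)
          rw [hjm_eq] at this
          simp at this
          exact this hmpres
        -- min property: key m ≤ key k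
        have hkey : ((rank.get? m).getD 0) ≤ ((rank.get? k).getD 0) :=
          PySem.List.min?_isMin hminr k hkcand
        rw [rank_getD pr m jm hjm, rank_getD pr k jk hjk] at hkey
        have hji : jm = i := by omega
        subst hji
        have hmk : m = k := hjm_eq.symm.trans hik
        rw [hmk]
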